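-- pv_equiv track=rewrite | github.com/TheBunnyX/Training_a_Word2Vec_CBOW_Model_from_Scratch_Using_PyTorch | main.py | generate_training_samples
-- ===== SOURCE A (Python) =====
-- def generate_training_samples(words, word_to_idx, context_window_size):
--     samples = []
--     for i in range(context_window_size, len(words) - context_window_size):
--         context = []
--         for j in range(i - context_window_size, i + context_window_size + 1):
--             if j != i:
--                 context.append(word_to_idx[words[j]])
--         center_word = word_to_idx[words[i]]
--         samples.append((context, center_word))
--     return samples
-- ===== SOURCE B (Python) =====
-- def generate_training_samples(words, word_to_idx, context_window_size):
--     w = context_window_size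
--     n = len(words)
--     if n - w <= w:
--         return []
--     # one dict lookup per word, then slide a (2w+1)-wide window of indices
--     idxs = [word_to_idx[x] for x in words]
--     window = idxs[:2 * w + 1]
--     samples = []
--     for i in range(w, n - w):
--         samples.append((window[:w] + window[w + 1:], window[w]))
--         if i + w + 1 < n:
--             window = window[1:] + [idxs[i + w + 1]]
--     return samples
-- ===== Notes on version B (the rewrite author's own statement) =====
-- stated objective: alternative
-- what changed: B precomputes the index of every word once and then slides an explicit (2w+1)-wide window buffer across that index list, emitting each sample from the buffer, instead of A's per-sample inner loop that re-looks-up each context word in the dict.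
import Mathlib
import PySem

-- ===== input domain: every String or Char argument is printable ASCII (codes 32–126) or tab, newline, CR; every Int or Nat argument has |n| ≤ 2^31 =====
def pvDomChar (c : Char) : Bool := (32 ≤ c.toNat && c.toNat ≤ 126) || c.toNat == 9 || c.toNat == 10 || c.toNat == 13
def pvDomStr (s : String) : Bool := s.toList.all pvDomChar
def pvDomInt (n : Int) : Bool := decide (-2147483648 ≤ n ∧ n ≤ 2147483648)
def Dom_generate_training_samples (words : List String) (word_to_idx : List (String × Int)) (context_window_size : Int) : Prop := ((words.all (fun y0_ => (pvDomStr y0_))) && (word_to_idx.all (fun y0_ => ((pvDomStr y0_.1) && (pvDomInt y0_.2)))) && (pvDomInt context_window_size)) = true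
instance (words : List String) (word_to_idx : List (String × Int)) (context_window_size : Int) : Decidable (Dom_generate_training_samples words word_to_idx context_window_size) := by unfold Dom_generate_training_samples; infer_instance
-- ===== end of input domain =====

-- B precomputes every word's index ONCE and slides an explicit (2w+1)-wide window buffer over
-- that index list, instead of A's per-sample inner loop re-looking-up each context word.

-- dict subscript word_to_idx[w]: first matching key; default only taken outside Pre_ (Python raises KeyError there)
def pvLook (d : List (String × Int)) (k : String) : Int := (d.lookup k).getD 0

-- ===== PORT A =====
def generate_training_samples (words : List String) (word_to_idx : List (String × Int)) (context_window_size : Int) : List (List Int × Int) :=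
  (PySem.List.pyRange context_window_size ((words.length : Int) - context_window_size) 1).foldl
    (fun samples i =>
      let context :=
        (PySem.List.pyRange (i - context_window_size) (i + context_window_size + 1) 1).foldl
          (fun ctx j => if j != i then ctx ++ [pvLook word_to_idx (PySem.List.pyGetD words j "")] else ctx) []
      let center_word := pvLook word_to_idx (PySem.List.pyGetD words i "")
      samples ++ [(context, center_word)]) []

-- ===== PORT B =====
def generate_training_samples_alt (words : List String) (word_to_idx : List (String × Int)) (context_window_size : Int) : List (List Int × Int) :=
  let w := context_window_size
  let n : Int := words.length
  if n - w ≤ w then []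
  else
    let idxs := words.map (pvLook word_to_idx)
    ((PySem.List.pyRange w (n - w) 1).foldl
      (fun (st : List (List Int × Int) × List Int) i =>
        let samples := st.1 ++
          [(PySem.List.slice st.2 none (some w) ++ PySem.List.slice st.2 (some (w + 1)) none,
            PySem.List.pyGetD st.2 w 0)]
        let window :=
          if i + w + 1 < n then
            PySem.List.slice st.2 (some 1) none ++ [PySem.List.pyGetD idxs (i + w + 1) 0]
          else st.2
        (samples, window))
      ([], PySem.List.slice idxs none (some (2 * w + 1)))).1

-- ===== PRECONDITION & SPEC =====
-- Pre_ excludes exactly the inputs where the Python A raises: a negative window (the center index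
-- eventually leaves the list, IndexError) and a non-empty sample loop with a word missing from the
-- dict (KeyError).
def Pre_generate_training_samples (words : List String) (word_to_idx : List (String × Int)) (context_window_size : Int) : Prop :=
  0 ≤ context_window_size ∧
  ((words.length : Int) - context_window_size ≤ context_window_size ∨
    ∀ w ∈ words, w ∈ word_to_idx.map Prod.fst)
instance (words : List String) (word_to_idx : List (String × Int)) (context_window_size : Int) : Decidable (Pre_generate_training_samples words word_to_idx context_window_size) := by unfold Pre_generate_training_samples; infer_instance

def pvWitness_generate_training_samples : List String × (List (String × Int)) × Int :=
  (["a", "b", "c", "a"], [("a", 0), ("b", 1), ("c", 2)], 1)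

def Spec_generate_training_samples (words : List String) (word_to_idx : List (String × Int)) (context_window_size : Int) (out : List (List Int × Int)) : Prop := out = generate_training_samples_alt words word_to_idx context_window_size
instance (words : List String) (word_to_idx : List (String × Int)) (context_window_size : Int) (out : List (List Int × Int)) : Decidable (Spec_generate_training_samples words word_to_idx context_window_size out) := by unfold Spec_generate_training_samples; infer_instance

-- ===== CLAIM (what is proved, stated in full; the proofs are below) =====
def Claim_equal_generate_training_samples : Prop := ∀ (words : List String) (word_to_idx : List (String × Int)) (context_window_size : Int), Dom_generate_training_samples words word_to_idx context_window_size → Pre_generate_training_samples words word_to_idx context_window_size → Spec_generate_training_samples words word_to_idx context_window_size (generate_training_samples words word_to_idx context_window_size)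

-- ===== LEMMAS AND PROOFS =====

-- the per-center sample both programs produce, phrased on the precomputed index list
def pvSample (idxs : List Int) (w i : Int) : List Int × Int :=
  (PySem.List.slice idxs (some (i - w)) (some i) ++ PySem.List.slice idxs (some (i + 1)) (some (i + w + 1)),
   PySem.List.pyGetD idxs i 0)

-- a map of pyGetD over a bounded range is the corresponding slice
lemma map_pyGetD_eq_slice {α : Type} (xs : List α) (a b : Int) (d : α)
    (h0 : 0 ≤ a) (hab : a ≤ b) (hb : b ≤ (xs.length : Int)) :
    (PySem.List.pyRange a b 1).map (fun j => PySem.List.pyGetD xs j d)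
      = PySem.List.slice xs (some a) (some b) := by
  rw [PySem.List.slice_of_nonneg xs h0 (le_trans h0 hab) (le_trans hab hb) hb, PySem.List.pyRange_one]
  apply List.ext_getElem
  · simp
    omega
  · intro k h1 h2
    simp only [List.getElem_map, List.getElem_range, List.getElem_take, List.getElem_drop]
    rw [PySem.List.pyGetD_eq_getElem]
    · congr 1
      simp at h1
      omega
    · omega
    · simp at h1 ⊢
      omega

-- slicing commutes with mapping the lookup (nonnegative bounds within range)
lemma slice_map_of_nonneg {α β : Type} (f : α → β) (xs : List α) (a b : Int)
    (h0 : 0 ≤ a) (h1 : 0 ≤ b) :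
    PySem.List.slice (xs.map f) (some a) (some b) = (PySem.List.slice xs (some a) (some b)).map f := by
  rw [PySem.List.slice_toNat _ h0 h1, PySem.List.slice_toNat _ h0 h1]
  simp [List.map_take, List.map_drop]

-- indexing commutes with mapping the lookup (in range, defaults never taken)
lemma pyGetD_map_look (words : List String) (d : List (String × Int)) (i : Int)
    (h0 : 0 ≤ i) (h1 : i < (words.length : Int)) :
    PySem.List.pyGetD (words.map (pvLook d)) i 0 = pvLook d (PySem.List.pyGetD words i "") := by
  rw [PySem.List.pyGetD_eq_getElem _ _ h0 (by simpa using h1),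
      PySem.List.pyGetD_eq_getElem _ _ h0 h1]
  simp

-- A's inner loop at center i, paired with its center lookup, is the sample on the index list
lemma inner_loop_eq (words : List String) (word_to_idx : List (String × Int)) (cws i : Int)
    (hc : 0 ≤ cws) (hi : cws ≤ i) (hi2 : i < (words.length : Int) - cws) :
    ((PySem.List.pyRange (i - cws) (i + cws + 1) 1).foldl
      (fun ctx j => if j != i then ctx ++ [pvLook word_to_idx (PySem.List.pyGetD words j "")] else ctx) [],
     pvLook word_to_idx (PySem.List.pyGetD words i ""))
    = pvSample (words.map (pvLook word_to_idx)) cws i := by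
  rw [PySem.List.foldl_append_if (fun j => j != i)]
  rw [PySem.List.pyRange_one_append (i - cws) i (i + cws + 1) (by omega) (by omega)]
  rw [PySem.List.pyRange_one_cons (show i < i + cws + 1 by omega)]
  rw [List.filter_append]
  have hleft : (PySem.List.pyRange (i - cws) i 1).filter (fun j => j != i)
      = PySem.List.pyRange (i - cws) i 1 := by
    apply List.filter_eq_self.mpr
    intro j hj
    rw [PySem.List.mem_pyRange_one] at hj
    simp
    omega
  have hright : ((i :: PySem.List.pyRange (i + 1) (i + cws + 1) 1).filter (fun j => j != i))
      = PySem.List.pyRange (i + 1) (i + cws + 1) 1 := by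
    rw [List.filter_cons]
    simp only [bne_self_eq_false, Bool.false_eq_true, if_false]
    apply List.filter_eq_self.mpr
    intro j hj
    rw [PySem.List.mem_pyRange_one] at hj
    simp
    omega
  rw [hleft, hright, List.nil_append, List.map_append]
  unfold pvSample
  rw [slice_map_of_nonneg _ _ _ _ (by omega) (by omega),
      slice_map_of_nonneg _ _ _ _ (by omega) (by omega),
      pyGetD_map_look _ _ _ (by omega) (by omega)]
  rw [← map_pyGetD_eq_slice words (i - cws) i "" (by omega) (by omega) (by omega)]
  rw [← map_pyGetD_eq_slice words (i + 1) (i + cws + 1) "" (by omega) (by omega) (by omega)]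
  simp [Function.comp_def]

-- B's window-buffer facts, at Nat level: window = (xs.drop p).take (2q+1)
lemma window_take {α : Type} (xs : List α) (p q : Nat) :
    ((xs.drop p).take (2 * q + 1)).take q = (xs.drop p).take q := by
  rw [List.take_take]; congr 1; omega

lemma window_drop {α : Type} (xs : List α) (p q : Nat) :
    ((xs.drop p).take (2 * q + 1)).drop (q + 1) = (xs.drop (p + q + 1)).take q := by
  rw [List.drop_take, List.drop_drop]
  congr 1
  all_goals omega

lemma window_get (xs : List Int) (p q : Nat) (h : p + 2 * q + 1 ≤ xs.length) :
    PySem.List.pyGetD ((xs.drop p).take (2 * q + 1)) (q : Int) 0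
      = PySem.List.pyGetD xs ((p : Int) + q) 0 := by
  have hc : ((p : Int) + q) = ((p + q : Nat) : Int) := by push_cast; ring
  rw [hc, PySem.List.pyGetD_natCast, PySem.List.pyGetD_natCast]
  rw [List.getD_eq_getElem _ _ (by simp; omega), List.getD_eq_getElem _ _ (by omega)]
  simp only [List.getElem_take, List.getElem_drop]

lemma window_shift (xs : List Int) (p q : Nat) (h : p + 2 * q + 2 ≤ xs.length) :
    ((xs.drop p).take (2 * q + 1)).drop 1 ++ [PySem.List.pyGetD xs ((p : Int) + 2 * q + 1) 0]
      = (xs.drop (p + 1)).take (2 * q + 1) := by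
  have hc : ((p : Int) + 2 * q + 1) = ((p + 2 * q + 1 : Nat) : Int) := by push_cast; ring
  rw [hc, PySem.List.pyGetD_natCast]
  rw [List.drop_take, List.drop_drop]
  have hg : xs.getD (p + 2 * q + 1) 0 = (xs.drop (p + 1))[2 * q]'(by simp; omega) := by
    rw [List.getD_eq_getElem _ _ (by omega)]
    simp only [List.getElem_drop]
    congr 1
    omega
  rw [hg, ← List.take_concat_get (by simp; omega), List.concat_eq_append]
  simp

-- main loop invariant of B: with window = the slice around center a, the fold appends the samples
lemma bloop (idxs : List Int) (w n : Int) (hw : 0 ≤ w) (hn : (idxs.length : Int) = n) :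
    ∀ (k : Nat) (a : Int) (samples : List (List Int × Int)),
      w ≤ a → a + k = n - w →
      ((PySem.List.pyRange a (n - w) 1).foldl
        (fun (st : List (List Int × Int) × List Int) i =>
          (st.1 ++
            [(PySem.List.slice st.2 none (some w) ++ PySem.List.slice st.2 (some (w + 1)) none,
              PySem.List.pyGetD st.2 w 0)],
           if i + w + 1 < n then
             PySem.List.slice st.2 (some 1) none ++ [PySem.List.pyGetD idxs (i + w + 1) 0]
           else st.2))
        (samples, PySem.List.slice idxs (some (a - w)) (some (a + w + 1)))).1
      = samples ++ (PySem.List.pyRange a (n - w) 1).map (pvSample idxs w) := by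
  intro k
  induction k with
  | zero =>
    intro a samples ha hk
    rw [PySem.List.pyRange_one_eq_nil (by omega)]
    simp
  | succ k ih =>
    intro a samples ha hk
    have hub : a + w + 1 ≤ n := by omega
    rw [PySem.List.pyRange_one_cons (show a < n - w by omega)]
    simp only [List.foldl_cons, List.map_cons]
    have hW : PySem.List.slice idxs (some (a - w)) (some (a + w + 1))
        = (idxs.drop (a - w).toNat).take (2 * w.toNat + 1) := by
      rw [PySem.List.slice_of_nonneg idxs (by omega) (by omega) (by omega) (by omega)]
      congr 1
      omega
    have hsample :
        (PySem.List.slice (PySem.List.slice idxs (some (a - w)) (some (a + w + 1))) none (some w)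
          ++ PySem.List.slice (PySem.List.slice idxs (some (a - w)) (some (a + w + 1))) (some (w + 1)) none,
         PySem.List.pyGetD (PySem.List.slice idxs (some (a - w)) (some (a + w + 1))) w 0)
        = pvSample idxs w a := by
      have hcenter := window_get idxs (a - w).toNat w.toNat (by omega)
      rw [show ((w.toNat : Nat) : Int) = w from by omega] at hcenter
      rw [show (((a - w).toNat : Nat) : Int) + w = a from by omega] at hcenter
      rw [hW, PySem.List.slice_to _ hw, PySem.List.slice_from _ (by omega)]
      rw [show (w + 1).toNat = w.toNat + 1 from by omega]
      rw [window_take, window_drop, hcenter]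
      unfold pvSample
      rw [PySem.List.slice_of_nonneg idxs (show (0:Int) ≤ a - w by omega) (by omega) (by omega) (by omega)]
      rw [PySem.List.slice_of_nonneg idxs (show (0:Int) ≤ a + 1 by omega) (by omega) (by omega) (by omega)]
      rw [show (a - w).toNat + w.toNat + 1 = (a + 1).toNat from by omega]
      rw [show a.toNat - (a - w).toNat = w.toNat from by omega]
      rw [show (a + w + 1).toNat - (a + 1).toNat = w.toNat from by omega]
    rw [hsample]
    by_cases hlast : a + w + 1 < n
    · have hupd :
          (if a + w + 1 < n then
            PySem.List.slice (PySem.List.slice idxs (some (a - w)) (some (a + w + 1))) (some 1) none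
              ++ [PySem.List.pyGetD idxs (a + w + 1) 0]
          else PySem.List.slice idxs (some (a - w)) (some (a + w + 1)))
          = PySem.List.slice idxs (some (a + 1 - w)) (some (a + 1 + w + 1)) := by
        rw [if_pos hlast, hW, PySem.List.slice_from_one, ← List.drop_one]
        rw [show a + w + 1 = ((a - w).toNat : Int) + 2 * w.toNat + 1 from by omega]
        rw [window_shift idxs _ _ (by omega)]
        rw [PySem.List.slice_of_nonneg idxs (show (0:Int) ≤ a + 1 - w by omega)
          (show (0:Int) ≤ a + 1 + w + 1 by omega)
          (show a + 1 - w ≤ ((idxs.length : Nat) : Int) by omega)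
          (show a + 1 + w + 1 ≤ ((idxs.length : Nat) : Int) by omega)]
        congr 1
        · omega
        · congr 1
          omega
      rw [hupd]
      rw [ih (a + 1) (samples ++ [pvSample idxs w a]) (by omega) (by omega)]
      simp
    · have hk0 : n - w = a + 1 := by omega
      rw [if_neg hlast, hk0, PySem.List.pyRange_one_eq_nil (by omega)]
      simp

-- ===== VERDICT (by name: the statement is the Claim_ definition above) =====
theorem generate_training_samples_spec : Claim_equal_generate_training_samples := by
  intro words word_to_idx cws _ hpre
  unfold Spec_generate_training_samples generate_training_samples generate_training_samples_alt
  by_cases hcase : (words.length : Int) - cws ≤ cws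
  · rw [if_pos hcase, PySem.List.pyRange_one_eq_nil (by omega), List.foldl_nil]
  · rw [if_neg hcase]
    dsimp only
    have hlen : ((words.map (pvLook word_to_idx)).length : Int) = (words.length : Int) := by simp
    have hinit : PySem.List.slice (words.map (pvLook word_to_idx)) none (some (2 * cws + 1))
        = PySem.List.slice (words.map (pvLook word_to_idx)) (some (cws - cws)) (some (cws + cws + 1)) := by
      rw [show cws - cws = (0 : Int) from by omega, PySem.List.slice_zero_start]
      congr 2
      omega
    rw [hinit]
    rw [bloop (words.map (pvLook word_to_idx)) cws (words.length : Int) hpre.1 hlen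
        ((words.length : Int) - 2 * cws).toNat cws [] (le_refl _) (by omega)]
    rw [List.nil_append]
    rw [PySem.List.foldl_append_singleton_eq_map
      (fun i => ((PySem.List.pyRange (i - cws) (i + cws + 1) 1).foldl
          (fun ctx j => if j != i then ctx ++ [pvLook word_to_idx (PySem.List.pyGetD words j "")] else ctx) [],
        pvLook word_to_idx (PySem.List.pyGetD words i "")))]
    rw [List.nil_append]
    apply List.map_congr_left
    intro i hi
    rw [PySem.List.mem_pyRange_one] at hi
    exact inner_loop_eq words word_to_idx cws i hpre.1 hi.1 hi.2
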